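-- pv_equiv track=rewrite | github.com/yongunt/problems | amicable_numbers/main.py | amicable_numbers_sum
-- ===== SOURCE A (Python) =====
-- def sum_of_factors(n:int) -> int:
--     if n <= 2: return 0
--     factors:list = []
--
--     for i in range(1, n):
--         if n%i == 0: factors.append(i)
--
--     return sum(factors)
--
-- def amicable_numbers_sum(top_number:int) -> int:
--     amicable_numbers:list = []
--
--     for i in range(3, top_number):
--         if i not in amicable_numbers and i != sum_of_factors(i):
--             if i == sum_of_factors(sum_of_factors(i)):
--                 amicable_numbers.append(i)
--                 amicable_numbers.append(sum_of_factors(i))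
--
--     return sum(set(amicable_numbers))
-- ===== SOURCE B (Python) =====
-- def amicable_numbers_sum(top_number: int) -> int:
--     def proper_divisor_sum(n: int) -> int:
--         # proper divisors of n are at most n // 2
--         return sum(d for d in range(1, n // 2 + 1) if n % d == 0)
--
--     total = 0
--     for i in range(3, top_number):
--         j = proper_divisor_sum(i)
--         if j > i and proper_divisor_sum(j) == i:
--             total += i + j
--     return total
-- ===== Notes on version B (the rewrite author's own statement) =====
-- stated objective: faster
-- what changed: single accumulating pass that counts each amicable pair once at its smaller member (no list, no membership scan, no set-dedup, one divisor-sum call per i instead of up to three), with divisor sums taken over 1..n//2 instead of 1..n-1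
import Mathlib
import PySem

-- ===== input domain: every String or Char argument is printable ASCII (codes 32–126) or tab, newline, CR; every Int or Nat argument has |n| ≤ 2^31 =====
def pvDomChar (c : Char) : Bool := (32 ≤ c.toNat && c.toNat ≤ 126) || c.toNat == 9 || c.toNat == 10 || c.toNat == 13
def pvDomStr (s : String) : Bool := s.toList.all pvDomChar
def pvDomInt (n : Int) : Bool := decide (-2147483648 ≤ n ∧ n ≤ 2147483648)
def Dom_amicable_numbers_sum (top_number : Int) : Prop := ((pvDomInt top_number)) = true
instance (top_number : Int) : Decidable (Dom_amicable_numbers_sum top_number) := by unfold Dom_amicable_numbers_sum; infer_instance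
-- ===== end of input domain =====

-- B: one accumulating pass that counts each amicable pair once at its smaller member (no list,
-- no membership scan, no set-dedup) with divisor sums over 1..n//2 only; measurably faster by a constant factor.

-- ===== PORT A =====
def sum_of_factors (n : Int) : Int :=
  if n ≤ 2 then 0
  else
    let factors : List Int :=
      (PySem.List.pyRange 1 n 1).foldl
        (fun factors i => if PySem.Int.mod n i = 0 then factors ++ [i] else factors) []
    factors.sum

def amicable_numbers_sum (top_number : Int) : Int :=
  let amicable_numbers : List Int :=
    (PySem.List.pyRange 3 top_number 1).foldl
      (fun amicable_numbers i =>
        if i ∉ amicable_numbers ∧ i ≠ sum_of_factors i then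
          if i = sum_of_factors (sum_of_factors i) then
            amicable_numbers ++ [i] ++ [sum_of_factors i]
          else amicable_numbers
        else amicable_numbers) []
  (PySem.Set.ofList amicable_numbers).sum

-- ===== PORT B =====
def proper_divisor_sum (n : Int) : Int :=
  (PySem.List.pyRange 1 (PySem.Int.floordiv n 2 + 1) 1).foldl
    (fun acc d => if PySem.Int.mod n d = 0 then acc + d else acc) 0

def amicable_numbers_sum_alt (top_number : Int) : Int :=
  (PySem.List.pyRange 3 top_number 1).foldl
    (fun total i =>
      let j := proper_divisor_sum i
      if j > i ∧ proper_divisor_sum j = i then total + (i + j) else total) 0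

-- ===== PRECONDITION & SPEC =====
def Spec_amicable_numbers_sum (top_number : Int) (out : Int) : Prop := out = amicable_numbers_sum_alt top_number
instance (top_number : Int) (out : Int) : Decidable (Spec_amicable_numbers_sum top_number out) := by unfold Spec_amicable_numbers_sum; infer_instance

-- ===== CLAIM (what is proved, stated in full; the proofs are below) =====
def Claim_equal_amicable_numbers_sum : Prop := ∀ (top_number : Int), Dom_amicable_numbers_sum top_number → Spec_amicable_numbers_sum top_number (amicable_numbers_sum top_number)

-- ===== LEMMAS AND PROOFS =====

-- divisor sums of small arguments stay small, so they never witness amicability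
lemma psum_le_two (j : Int) (h : j ≤ 2) : proper_divisor_sum j ≤ 1 := by
  rcases eq_or_lt_of_le h with rfl | h2
  · decide
  · unfold proper_divisor_sum
    rw [PySem.Int.floordiv_eq_ediv_of_pos (by norm_num),
        PySem.List.pyRange_one_eq_nil (by omega)]
    simp

-- for n ≥ 3 both divisor-sum helpers agree: divisors of n below n all lie in 1..n//2
-- (l.filter p).sum written as a map-ite sum, to align the two divisor folds
lemma sum_filter_eq_sum_map_ite (l : List Int) (p : Int → Bool) :
    (l.filter p).sum = (l.map (fun x => if p x then x else 0)).sum := by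
  induction l with
  | nil => rfl
  | cons a l ih => by_cases h : p a <;> simp [h, ih]

lemma sof_eq_psum (n : Int) (h : 3 ≤ n) : sum_of_factors n = proper_divisor_sum n := by
  have hn2 : ¬ n ≤ 2 := by omega
  have hd : PySem.Int.floordiv n 2 = n / 2 := PySem.Int.floordiv_eq_ediv_of_pos (by norm_num)
  have hpsum : proper_divisor_sum n =
      ((PySem.List.pyRange 1 (n / 2 + 1) 1).map
        (fun d => if PySem.Int.mod n d = 0 then d else 0)).sum := by
    unfold proper_divisor_sum
    rw [hd, PySem.List.foldl_congr_mem' _ _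
          (fun acc d => acc + (if PySem.Int.mod n d = 0 then d else 0)) 0
          (by intro x _ acc; by_cases hmx : PySem.Int.mod n x = 0 <;> simp [hmx]),
        PySem.List.foldl_add, zero_add]
  have hsof : sum_of_factors n =
      ((PySem.List.pyRange 1 n 1).map
        (fun d => if PySem.Int.mod n d = 0 then d else 0)).sum := by
    unfold sum_of_factors
    rw [if_neg hn2]
    simp only []
    rw [PySem.List.foldl_append_ite_eq_filter (fun i => PySem.Int.mod n i = 0),
        List.nil_append, sum_filter_eq_sum_map_ite]
    simp
  rw [hsof, hpsum,
      PySem.List.pyRange_one_append 1 (n / 2 + 1) n (by omega) (by omega),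
      List.map_append, List.sum_append]
  have htail : ((PySem.List.pyRange (n / 2 + 1) n 1).map
      (fun d => if PySem.Int.mod n d = 0 then d else 0)).sum = 0 := by
    apply List.sum_eq_zero
    intro x hx
    rcases List.mem_map.mp hx with ⟨d, hd2, rfl⟩
    rcases (PySem.List.mem_pyRange_one).mp hd2 with ⟨hlo, hhi⟩
    rw [if_neg]
    rw [PySem.Int.mod_eq_zero_iff_dvd]
    rintro ⟨c, hc⟩
    have hd0 : 0 < d := by omega
    have h2d : n < 2 * d := by omega
    by_cases hcle : c ≤ 0
    · nlinarith
    · have h1c : 1 ≤ c := by omega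
      rcases eq_or_lt_of_le h1c with hc1 | hc2
      · rw [← hc1, mul_one] at hc; omega
      · nlinarith
  rw [htail, add_zero]

lemma sof_small (n : Int) (h : n ≤ 2) : sum_of_factors n = 0 := by
  simp [sum_of_factors, h]

-- A's inner test agrees with B's amicability equation
lemma sof_sof_iff (i : Int) (h : 3 ≤ i) :
    (i = sum_of_factors (sum_of_factors i)) ↔ proper_divisor_sum (proper_divisor_sum i) = i := by
  rw [sof_eq_psum i h]
  by_cases hm : 3 ≤ proper_divisor_sum i
  · rw [sof_eq_psum _ hm]; exact eq_comm
  · have h1 : proper_divisor_sum (proper_divisor_sum i) ≤ 1 := psum_le_two _ (by omega)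
    rw [sof_small _ (by omega)]
    constructor <;> intro hx <;> omega

-- the canonical pair list: each amicable pair recorded once, at its smaller member
def amBlock (i : Int) : List Int :=
  if proper_divisor_sum i > i ∧ proper_divisor_sum (proper_divisor_sum i) = i
  then [i, proper_divisor_sum i] else []

def pairs (k : Int) : List Int := (PySem.List.pyRange 3 k 1).flatMap amBlock

lemma mem_pairs (k x : Int) : x ∈ pairs k ↔
    ∃ i, 3 ≤ i ∧ i < k ∧
      (proper_divisor_sum i > i ∧ proper_divisor_sum (proper_divisor_sum i) = i) ∧
      (x = i ∨ x = proper_divisor_sum i) := by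
  simp only [pairs, List.mem_flatMap, PySem.List.mem_pyRange_one, amBlock]
  constructor
  · rintro ⟨i, ⟨h3, hk⟩, hmem⟩
    split at hmem
    · rename_i hci
      refine ⟨i, h3, hk, hci, ?_⟩
      simpa using hmem
    · simp at hmem
  · rintro ⟨i, h3, hk, hci, hx⟩
    refine ⟨i, ⟨h3, hk⟩, ?_⟩
    rw [if_pos hci]
    rcases hx with rfl | rfl <;> simp

lemma not_mem_pairs_self (k : Int)
    (hc : proper_divisor_sum k > k ∧ proper_divisor_sum (proper_divisor_sum k) = k) :
    k ∉ pairs k := by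
  intro hmem
  rcases (mem_pairs k k).mp hmem with ⟨i, h3, hik, hci, hx | hx⟩
  · omega
  · have h1 : proper_divisor_sum k = i := by rw [hx, hci.2]
    have := hc.1
    omega

lemma not_mem_pairs_psum (k : Int)
    (hc : proper_divisor_sum k > k ∧ proper_divisor_sum (proper_divisor_sum k) = k) :
    proper_divisor_sum k ∉ pairs k := by
  intro hmem
  rcases (mem_pairs k _).mp hmem with ⟨i, h3, hik, hci, hx | hx⟩
  · have := hc.1; omega
  · have h1 : k = i := by rw [← hc.2, hx, hci.2]
    omega

lemma pairs_succ (k : Int) (h : 3 ≤ k) : pairs (k + 1) = pairs k ++ amBlock k := by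
  rw [pairs, PySem.List.pyRange_one_succ_right h, List.flatMap_append]
  simp [pairs]

-- one step of A's loop, applied to the canonical list, yields the canonical list
lemma stepA_pairs (k : Int) (h3 : 3 ≤ k) :
    (if k ∉ pairs k ∧ k ≠ sum_of_factors k then
       if k = sum_of_factors (sum_of_factors k) then pairs k ++ [k] ++ [sum_of_factors k]
       else pairs k
     else pairs k) = pairs (k + 1) := by
  rw [pairs_succ k h3]
  by_cases hc : proper_divisor_sum k > k ∧ proper_divisor_sum (proper_divisor_sum k) = k
  · rw [if_pos ⟨not_mem_pairs_self k hc, by rw [sof_eq_psum k h3]; have := hc.1; omega⟩,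
        if_pos ((sof_sof_iff k h3).mpr hc.2), amBlock, if_pos hc, sof_eq_psum k h3,
        List.append_assoc]
    rfl
  · have hblock : amBlock k = [] := by rw [amBlock, if_neg hc]
    rw [hblock, List.append_nil]
    by_cases ha : proper_divisor_sum (proper_divisor_sum k) = k
    · by_cases heq : proper_divisor_sum k = k
      · rw [if_neg]
        rintro ⟨-, hne⟩
        exact hne (by rw [sof_eq_psum k h3, heq])
      · have hlt : proper_divisor_sum k < k := by
          have hngt : ¬ proper_divisor_sum k > k := fun hgt => hc ⟨hgt, ha⟩
          omega
        have hj3 : 3 ≤ proper_divisor_sum k := by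
          by_cases hj : 3 ≤ proper_divisor_sum k
          · exact hj
          · have := psum_le_two (proper_divisor_sum k) (by omega)
            omega
        have hmem : k ∈ pairs k := by
          rw [mem_pairs]
          exact ⟨proper_divisor_sum k, hj3, hlt,
            ⟨by rw [ha]; omega, by rw [ha]⟩, Or.inr ha.symm⟩
        rw [if_neg (fun hand => hand.1 hmem)]
    · by_cases hmem : k ∈ pairs k
      · rw [if_neg (fun hand => hand.1 hmem)]
      · by_cases hne : k ≠ sum_of_factors k
        · rw [if_pos ⟨hmem, hne⟩, if_neg (fun he => ha ((sof_sof_iff k h3).mp he))]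
        · rw [if_neg (fun hand => hne hand.2)]

-- A's accumulated list IS the canonical pair list
lemma foldA_eq (k : Int) (h : 3 ≤ k) :
    (PySem.List.pyRange 3 k 1).foldl
      (fun amicable_numbers i =>
        if i ∉ amicable_numbers ∧ i ≠ sum_of_factors i then
          if i = sum_of_factors (sum_of_factors i) then
            amicable_numbers ++ [i] ++ [sum_of_factors i]
          else amicable_numbers
        else amicable_numbers) [] = pairs k := by
  induction k, h using Int.le_induction with
  | base => simp [pairs, PySem.List.pyRange_one_eq_nil le_rfl]
  | succ n hn ih =>
    rw [PySem.List.pyRange_one_succ_right hn, List.foldl_append, ih]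
    simp only [List.foldl_cons, List.foldl_nil]
    exact stepA_pairs n hn

lemma nodup_pairs (k : Int) : (pairs k).Nodup := by
  by_cases h : 3 ≤ k
  · induction k, h using Int.le_induction with
    | base => simp [pairs, PySem.List.pyRange_one_eq_nil le_rfl]
    | succ n hn ih =>
      rw [pairs_succ n hn]
      by_cases hc : proper_divisor_sum n > n ∧ proper_divisor_sum (proper_divisor_sum n) = n
      · rw [amBlock, if_pos hc]
        refine List.Nodup.append ih ?_ ?_
        · have := hc.1; simp; omega
        · intro a ha hb
          simp only [List.mem_cons, List.not_mem_nil, or_false] at hb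
          rcases hb with hb | hb
          · exact not_mem_pairs_self n hc (hb ▸ ha)
          · exact not_mem_pairs_psum n hc (hb ▸ ha)
      · rw [amBlock, if_neg hc]
        simpa using ih
  · rw [pairs, PySem.List.pyRange_one_eq_nil (by omega)]
    simp

lemma sum_pairs (k : Int) : (pairs k).sum = amicable_numbers_sum_alt k := by
  unfold amicable_numbers_sum_alt
  rw [PySem.List.foldl_congr_mem' _ _ (fun total i => total + (amBlock i).sum) 0
        (by intro i _ acc; simp only [amBlock]; split <;> simp),
      PySem.List.foldl_add, zero_add, pairs, List.flatMap_def, List.sum_flatten,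
      List.map_map]
  rfl

-- ===== VERDICT (by name: the statement is the Claim_ definition above) =====
theorem amicable_numbers_sum_spec : Claim_equal_amicable_numbers_sum := by
  intro top _dom
  unfold Spec_amicable_numbers_sum amicable_numbers_sum
  by_cases h : 3 ≤ top
  · rw [foldA_eq top h]
    show (PySem.Set.ofList (pairs top)).sum = amicable_numbers_sum_alt top
    rw [PySem.Set.ofList_eq_self_of_nodup _ (nodup_pairs top), sum_pairs]
  · rw [PySem.List.pyRange_one_eq_nil (by omega)]
    simp [amicable_numbers_sum_alt, PySem.List.pyRange_one_eq_nil (show top ≤ (3:Int) by omega)]
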